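-- pv_equiv track=rewrite | github.com/johnssonwong/dg-monitor | dg_monitor.py | analyze_tables
-- ===== SOURCE A (Python) =====
-- def analyze_tables(tables):
--     long_streak = 0
--     multi_streak = 0
--     single_jump = 0
--     for seq in tables:
--         if len(seq)>=4 and all(x==seq[0] for x in seq):
--             long_streak += 1
--         for i in range(len(seq)-2):
--             if seq[i]==seq[i+1]==seq[i+2]:
--                 multi_streak += 1
--                 break
--         for i in range(len(seq)-3):
--             if seq[i]!=seq[i+1]!=seq[i+2]!=seq[i+3]:
--                 single_jump += 1
--                 break
--     return long_streak, multi_streak, single_jump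
-- ===== SOURCE B (Python) =====
-- def analyze_tables(tables):
--     long_streak = 0
--     multi_streak = 0
--     single_jump = 0
--     for seq in tables:
--         if len(seq) >= 4 and all(x == seq[0] for x in seq):
--             long_streak += 1
--         eq_run = 1
--         diff_run = 1
--         multi = False
--         jump = False
--         for prev, cur in zip(seq, seq[1:]):
--             if cur == prev:
--                 eq_run += 1
--                 diff_run = 1
--             else:
--                 eq_run = 1
--                 diff_run += 1
--             if eq_run >= 3:
--                 multi = True
--             if diff_run >= 4:
--                 jump = True
--         if multi:
--             multi_streak += 1
--         if jump:
--             single_jump += 1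
--     return long_streak, multi_streak, single_jump
-- ===== Notes on version B (the rewrite author's own statement) =====
-- stated objective: alternative
-- what changed: Per sequence, A runs three separate fixed-window index scans (with break); B does a single left-to-right pass over adjacent pairs maintaining eq_run/diff_run run-length counters that set the multi/jump flags, keeping only the all-equal long-streak check as a direct test.
import Mathlib
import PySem

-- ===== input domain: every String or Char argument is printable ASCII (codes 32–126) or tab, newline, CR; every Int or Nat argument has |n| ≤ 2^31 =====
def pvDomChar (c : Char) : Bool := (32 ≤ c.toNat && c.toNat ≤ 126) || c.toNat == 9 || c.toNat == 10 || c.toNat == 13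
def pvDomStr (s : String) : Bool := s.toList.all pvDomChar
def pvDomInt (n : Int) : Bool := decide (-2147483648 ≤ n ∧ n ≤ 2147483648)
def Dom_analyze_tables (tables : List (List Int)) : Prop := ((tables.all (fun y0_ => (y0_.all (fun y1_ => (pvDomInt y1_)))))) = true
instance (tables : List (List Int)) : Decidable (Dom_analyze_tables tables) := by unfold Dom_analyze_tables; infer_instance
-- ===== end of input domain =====

-- B replaces A's three fixed-window index loops per sequence by a single left-to-right pass
-- maintaining run counters (alternative decomposition; same asymptotic cost).


-- ===== PORT A =====
-- 'for i in range(len(seq)-2): if seq[i]==seq[i+1]==seq[i+2]: multi_streak += 1; break'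
-- break = stop and contribute 1.  Indices produced by range are always in bounds, so
-- pyGetD's default 0 is never used (exact port of seq[i]).
def loopA3 (seq : List Int) : List Int → Int
  | [] => 0
  | i :: rest =>
    if PySem.List.pyGetD seq i 0 = PySem.List.pyGetD seq (i+1) 0 ∧
       PySem.List.pyGetD seq (i+1) 0 = PySem.List.pyGetD seq (i+2) 0 then 1
    else loopA3 seq rest

-- 'for i in range(len(seq)-3): if seq[i]!=seq[i+1]!=seq[i+2]!=seq[i+3]: single_jump += 1; break'
def loopA4 (seq : List Int) : List Int → Int
  | [] => 0
  | i :: rest =>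
    if PySem.List.pyGetD seq i 0 ≠ PySem.List.pyGetD seq (i+1) 0 ∧
       PySem.List.pyGetD seq (i+1) 0 ≠ PySem.List.pyGetD seq (i+2) 0 ∧
       PySem.List.pyGetD seq (i+2) 0 ≠ PySem.List.pyGetD seq (i+3) 0 then 1
    else loopA4 seq rest

-- one iteration of 'for seq in tables' (seq[0] is only reached under len(seq)>=4, so pyGetD is exact)
def stepTableA (acc : Int × Int × Int) (seq : List Int) : Int × Int × Int :=
  let ls := if 4 ≤ (seq.length : Int) ∧ seq.all (fun x => x == PySem.List.pyGetD seq 0 0)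
            then acc.1 + 1 else acc.1
  let ms := acc.2.1 + loopA3 seq (PySem.List.pyRange 0 ((seq.length : Int) - 2) 1)
  let sj := acc.2.2 + loopA4 seq (PySem.List.pyRange 0 ((seq.length : Int) - 3) 1)
  (ls, ms, sj)

def analyze_tables (tables : List (List Int)) : Int × Int × Int :=
  tables.foldl stepTableA (0, 0, 0)

-- ===== PORT B =====
-- body of B's single inner loop 'for prev, cur in zip(seq, seq[1:])' with state (eq_run, diff_run, multi, jump)
def stepB (st : Int × Int × Bool × Bool) (pc : Int × Int) : Int × Int × Bool × Bool :=
  let (e, d, m, j) := st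
  let (prev, cur) := pc
  let (e, d) := if cur = prev then (e + 1, (1 : Int)) else ((1 : Int), d + 1)
  let m := if 3 ≤ e then true else m
  let j := if 4 ≤ d then true else j
  (e, d, m, j)

-- one iteration of B's 'for seq in tables'; seq[1:] = seq.drop 1 (exact for a nonnegative slice start)
def stepTableB (acc : Int × Int × Int) (seq : List Int) : Int × Int × Int :=
  let ls := if 4 ≤ (seq.length : Int) ∧ seq.all (fun x => x == PySem.List.pyGetD seq 0 0)
            then acc.1 + 1 else acc.1
  let st := (seq.zip (seq.drop 1)).foldl stepB (1, 1, false, false)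
  let ms := if st.2.2.1 then acc.2.1 + 1 else acc.2.1
  let sj := if st.2.2.2 then acc.2.2 + 1 else acc.2.2
  (ls, ms, sj)

def analyze_tables_alt (tables : List (List Int)) : Int × Int × Int :=
  tables.foldl stepTableB (0, 0, 0)

-- ===== PRECONDITION & SPEC =====
def Spec_analyze_tables (tables : List (List Int)) (out : Int × Int × Int) : Prop := out = analyze_tables_alt tables
instance (tables : List (List Int)) (out : Int × Int × Int) : Decidable (Spec_analyze_tables tables out) := by unfold Spec_analyze_tables; infer_instance

-- ===== CLAIM (what is proved, stated in full; the proofs are below) =====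
def Claim_equal_analyze_tables : Prop := ∀ (tables : List (List Int)), Dom_analyze_tables tables → Spec_analyze_tables tables (analyze_tables tables)

-- ===== LEMMAS AND PROOFS =====

-- spec middle-man: does the sequence contain three consecutive equal elements?
def trip : List Int → Bool
  | a :: b :: c :: r => (a == b && b == c) || trip (b :: c :: r)
  | _ => false

-- does the sequence contain four consecutive pairwise-adjacent-different elements?
def jump4 : List Int → Bool
  | a :: b :: c :: d :: r => (a != b && b != c && c != d) || jump4 (b :: c :: d :: r)
  | _ => false

-- a concrete list of n elements whose adjacent elements all differ, ending in p (n ∈ {1,2,3})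
def chainD : Nat → Int → List Int
  | 2, p => [p + 1, p]
  | 3, p => [p, p + 1, p]
  | _, p => [p]

lemma chainD_length (n : Nat) (p : Int) : (chainD n p).length ≤ 3 := by
  unfold chainD; split <;> simp

lemma trip_short (l : List Int) (h : l.length < 3) : trip l = false := by
  match l with
  | [] => rfl
  | [_] => rfl
  | [_, _] => rfl
  | _ :: _ :: _ :: _ => simp at h; omega

lemma trip_ne {a b : Int} (l : List Int) (h : a ≠ b) : trip (a :: b :: l) = trip (b :: l) := by
  match l with
  | [] => simp [trip]
  | c :: r => simp [trip, h]

lemma jump4_short (l : List Int) (h : l.length < 4) : jump4 l = false := by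
  match l with
  | [] => rfl
  | [_] => rfl
  | [_, _] => rfl
  | [_, _, _] => rfl
  | _ :: _ :: _ :: _ :: _ => simp at h; omega

lemma jump4_eq_pair (b : Int) (l : List Int) : jump4 (b :: b :: l) = jump4 (b :: l) := by
  match l with
  | [] => rfl
  | [_] => simp [jump4]
  | c :: d :: r => simp [jump4]

lemma jump4_drop_head (a b : Int) (l : List Int) : jump4 (a :: b :: b :: l) = jump4 (b :: b :: l) := by
  match l with
  | [] => rfl
  | c :: r => simp [jump4]

lemma jump4_head_irrel {a a' b : Int} (l : List Int) (h : a ≠ b) (h' : a' ≠ b) :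
    jump4 (a :: b :: l) = jump4 (a' :: b :: l) := by
  match l with
  | [] => rfl
  | [_] => rfl
  | c :: d :: r =>
    have e1 : (a != b) = true := by simp [h]
    have e2 : (a' != b) = true := by simp [h']
    simp only [jump4, e1, e2]

lemma jump4_head2_irrel {a a' b b' c : Int} (l : List Int)
    (hab : a ≠ b) (hbc : b ≠ c) (hab' : a' ≠ b') (hbc' : b' ≠ c) :
    jump4 (a :: b :: c :: l) = jump4 (a' :: b' :: c :: l) := by
  match l with
  | [] => rfl
  | x :: r =>
    have e1 : (a != b) = true := by simp [hab]
    have e2 : (b != c) = true := by simp [hbc]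
    have e3 : (a' != b') = true := by simp [hab']
    have e4 : (b' != c) = true := by simp [hbc']
    simp only [jump4, e1, e2, e3, e4]
    rw [jump4_head_irrel (x :: r) hbc hbc']

-- flags are monotone: they never revert to false, and the main invariant of B's pass
lemma foldB_spec : ∀ (l : List Int) (p e d : Int) (m j : Bool),
    1 ≤ e → (m = false → e ≤ 2) → 1 ≤ d → (j = false → d ≤ 3) →
    (((p :: l).zip l).foldl stepB (e, d, m, j)).2.2.1
        = (m || trip (List.replicate (min e.toNat 2) p ++ l)) ∧
    (((p :: l).zip l).foldl stepB (e, d, m, j)).2.2.2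
        = (j || jump4 (chainD (min d.toNat 3) p ++ l)) := by
  intro l
  induction l with
  | nil =>
    intro p e d m j he hme hd hjd
    constructor
    · rw [trip_short]
      · simp
      · simp only [List.append_nil, List.length_replicate]; omega
    · rw [jump4_short]
      · simp
      · simp only [List.append_nil]
        have := chainD_length (min d.toNat 3) p
        omega
  | cons c r ih =>
    intro p e d m j he hme hd hjd
    rw [List.zip_cons_cons, List.foldl_cons]
    by_cases hc : c = p
    · subst hc
      have hstep : stepB (e, d, m, j) (c, c) = (e + 1, 1, (if 3 ≤ e + 1 then true else m), j) := by
        simp [stepB]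
      rw [hstep]
      obtain ⟨h1, h2⟩ := ih c (e + 1) 1 (if 3 ≤ e + 1 then true else m) j (by omega)
        (by intro hm'; by_cases h3 : 3 ≤ e + 1
            · simp [h3] at hm'
            · omega)
        (by omega) (by intro _; omega)
      rw [h1, h2]
      refine ⟨?_, ?_⟩
      · cases m with
        | false =>
          have he2 : e ≤ 2 := hme rfl
          interval_cases e
          · norm_num [(show (Int.toNat 2) = 2 from rfl), List.replicate_succ]
          · norm_num [(show (Int.toNat 2) = 2 from rfl), List.replicate_succ, trip]
        | true => simp
      · cases j with
        | false =>
          have hd3 : d ≤ 3 := hjd rfl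
          interval_cases d
          · norm_num [(show (Int.toNat 2) = 2 from rfl), Int.toNat_one, (show (Int.toNat 3) = 3 from rfl), chainD, jump4_eq_pair]
          · norm_num [(show (Int.toNat 2) = 2 from rfl), Int.toNat_one, (show (Int.toNat 3) = 3 from rfl), chainD, jump4_drop_head, jump4_eq_pair]
          · norm_num [(show (Int.toNat 2) = 2 from rfl), Int.toNat_one, (show (Int.toNat 3) = 3 from rfl), chainD]
            rw [show c :: (c + 1) :: c :: c :: r = [c] ++ (c+1) :: c :: c :: r from rfl]
            simp only [List.singleton_append, jump4]
            rw [jump4_drop_head, jump4_eq_pair]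
            simp
        | true => simp
    · have hstep : stepB (e, d, m, j) (p, c) = (1, d + 1, m, if 4 ≤ d + 1 then true else j) := by
        simp [stepB, hc]
      rw [hstep]
      have hpc : p ≠ c := fun h => hc h.symm
      obtain ⟨h1, h2⟩ := ih c 1 (d + 1) m (if 4 ≤ d + 1 then true else j) (by omega)
        (by intro _; omega) (by omega)
        (by intro hj'; by_cases h4 : 4 ≤ d + 1
            · simp [h4] at hj'
            · omega)
      rw [h1, h2]
      refine ⟨?_, ?_⟩
      · cases m with
        | false =>
          have he2 : e ≤ 2 := hme rfl
          interval_cases e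
          · norm_num [Int.toNat_one, trip_ne r hpc]
          · norm_num [(show (Int.toNat 2) = 2 from rfl), List.replicate_succ, trip, hpc, trip_ne r hpc]
        | true => simp
      · cases j with
        | false =>
          have hd3 : d ≤ 3 := hjd rfl
          interval_cases d
          · norm_num [(show (Int.toNat 2) = 2 from rfl), Int.toNat_one, (show (Int.toNat 3) = 3 from rfl), chainD]
            rw [jump4_head_irrel r (show c + 1 ≠ c by omega) hpc]
          · norm_num [(show (Int.toNat 2) = 2 from rfl), Int.toNat_one, (show (Int.toNat 3) = 3 from rfl), chainD]
            rw [jump4_head2_irrel r (show c ≠ c + 1 by omega) (show c + 1 ≠ c by omega)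
                  (show p + 1 ≠ p by omega) hpc]
          · norm_num [(show (Int.toNat 2) = 2 from rfl), Int.toNat_one, (show (Int.toNat 3) = 3 from rfl), chainD, jump4, hpc, show p ≠ p + 1 by omega, show p + 1 ≠ p by omega]
        | true => simp

-- B's per-sequence pass computes exactly the two window predicates
lemma scan_flags (seq : List Int) :
    ((seq.zip (seq.drop 1)).foldl stepB (1, 1, false, false)).2.2.1 = trip seq ∧
    ((seq.zip (seq.drop 1)).foldl stepB (1, 1, false, false)).2.2.2 = jump4 seq := by
  match seq with
  | [] => exact ⟨rfl, rfl⟩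
  | p :: l =>
    have h := foldB_spec l p 1 1 false false (by omega) (by intro _; omega) (by omega)
      (by intro _; omega)
    simpa [chainD] using h

-- A's first inner loop, started at index k, decides trip on the k-suffix
lemma loopA3_eq (seq : List Int) : ∀ (fuel k : Nat), seq.length ≤ k + fuel →
    loopA3 seq (PySem.List.pyRange (k : Int) ((seq.length : Int) - 2) 1)
      = (if trip (seq.drop k) then 1 else 0) := by
  intro fuel
  induction fuel with
  | zero =>
    intro k hk
    rw [PySem.List.pyRange_one_eq_nil (by omega), List.drop_eq_nil_of_le (by omega)]
    simp [loopA3, trip]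
  | succ f ihf =>
    intro k hk
    by_cases h : (k : Int) < (seq.length : Int) - 2
    · have hk2 : k + 2 < seq.length := by omega
      rw [PySem.List.pyRange_one_cons h]
      have g0 : PySem.List.pyGetD seq (k : Int) 0 = seq[k] := by
        rw [PySem.List.pyGetD_natCast, List.getD_eq_getElem seq 0 (by omega)]
      have g1 : PySem.List.pyGetD seq ((k : Int) + 1) 0 = seq[k + 1] := by
        rw [show ((k : Int) + 1) = ((k + 1 : Nat) : Int) from by push_cast; ring,
          PySem.List.pyGetD_natCast, List.getD_eq_getElem seq 0 (by omega)]
      have g2 : PySem.List.pyGetD seq ((k : Int) + 2) 0 = seq[k + 2] := by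
        rw [show ((k : Int) + 2) = ((k + 2 : Nat) : Int) from by push_cast; ring,
          PySem.List.pyGetD_natCast, List.getD_eq_getElem seq 0 (by omega)]
      have hdrop : seq.drop k = seq[k] :: seq[k + 1] :: seq[k + 2] :: seq.drop (k + 3) := by
        rw [List.drop_eq_getElem_cons (show k < seq.length by omega),
          List.drop_eq_getElem_cons (show k + 1 < seq.length by omega),
          List.drop_eq_getElem_cons (show k + 2 < seq.length by omega)]
      have hdrop1 : seq.drop (k + 1) = seq[k + 1] :: seq[k + 2] :: seq.drop (k + 3) := by
        rw [List.drop_eq_getElem_cons (show k + 1 < seq.length by omega),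
          List.drop_eq_getElem_cons (show k + 2 < seq.length by omega)]
      simp only [loopA3, g0, g1, g2]
      rw [hdrop]
      by_cases hcond : seq[k] = seq[k + 1] ∧ seq[k + 1] = seq[k + 2]
      · rw [if_pos hcond]
        have ht : trip (seq[k] :: seq[k + 1] :: seq[k + 2] :: seq.drop (k + 3)) = true := by
          simp [trip, hcond.1, hcond.2]
        rw [ht]; simp
      · rw [if_neg hcond,
          show ((k : Int) + 1) = ((k + 1 : Nat) : Int) from by push_cast; ring,
          ihf (k + 1) (by omega), hdrop1]
        have ht : trip (seq[k] :: seq[k + 1] :: seq[k + 2] :: seq.drop (k + 3))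
            = trip (seq[k + 1] :: seq[k + 2] :: seq.drop (k + 3)) := by
          simp only [trip]
          rcases not_and_or.mp hcond with h' | h' <;> simp [h']
        rw [ht]
    · rw [PySem.List.pyRange_one_eq_nil (by omega),
        trip_short _ (by rw [List.length_drop]; omega)]
      simp [loopA3]

-- A's second inner loop, started at index k, decides jump4 on the k-suffix
lemma loopA4_eq (seq : List Int) : ∀ (fuel k : Nat), seq.length ≤ k + fuel →
    loopA4 seq (PySem.List.pyRange (k : Int) ((seq.length : Int) - 3) 1)
      = (if jump4 (seq.drop k) then 1 else 0) := by
  intro fuel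
  induction fuel with
  | zero =>
    intro k hk
    rw [PySem.List.pyRange_one_eq_nil (by omega), List.drop_eq_nil_of_le (by omega)]
    simp [loopA4, jump4]
  | succ f ihf =>
    intro k hk
    by_cases h : (k : Int) < (seq.length : Int) - 3
    · have hk3 : k + 3 < seq.length := by omega
      rw [PySem.List.pyRange_one_cons h]
      have g0 : PySem.List.pyGetD seq (k : Int) 0 = seq[k] := by
        rw [PySem.List.pyGetD_natCast, List.getD_eq_getElem seq 0 (by omega)]
      have g1 : PySem.List.pyGetD seq ((k : Int) + 1) 0 = seq[k + 1] := by
        rw [show ((k : Int) + 1) = ((k + 1 : Nat) : Int) from by push_cast; ring,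
          PySem.List.pyGetD_natCast, List.getD_eq_getElem seq 0 (by omega)]
      have g2 : PySem.List.pyGetD seq ((k : Int) + 2) 0 = seq[k + 2] := by
        rw [show ((k : Int) + 2) = ((k + 2 : Nat) : Int) from by push_cast; ring,
          PySem.List.pyGetD_natCast, List.getD_eq_getElem seq 0 (by omega)]
      have g3 : PySem.List.pyGetD seq ((k : Int) + 3) 0 = seq[k + 3] := by
        rw [show ((k : Int) + 3) = ((k + 3 : Nat) : Int) from by push_cast; ring,
          PySem.List.pyGetD_natCast, List.getD_eq_getElem seq 0 (by omega)]
      have hdrop : seq.drop k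
          = seq[k] :: seq[k + 1] :: seq[k + 2] :: seq[k + 3] :: seq.drop (k + 4) := by
        rw [List.drop_eq_getElem_cons (show k < seq.length by omega),
          List.drop_eq_getElem_cons (show k + 1 < seq.length by omega),
          List.drop_eq_getElem_cons (show k + 2 < seq.length by omega),
          List.drop_eq_getElem_cons (show k + 3 < seq.length by omega)]
      have hdrop1 : seq.drop (k + 1)
          = seq[k + 1] :: seq[k + 2] :: seq[k + 3] :: seq.drop (k + 4) := by
        rw [List.drop_eq_getElem_cons (show k + 1 < seq.length by omega),
          List.drop_eq_getElem_cons (show k + 2 < seq.length by omega),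
          List.drop_eq_getElem_cons (show k + 3 < seq.length by omega)]
      simp only [loopA4, g0, g1, g2, g3]
      rw [hdrop]
      by_cases hcond : seq[k] ≠ seq[k + 1] ∧ seq[k + 1] ≠ seq[k + 2] ∧ seq[k + 2] ≠ seq[k + 3]
      · rw [if_pos hcond]
        have ht : jump4 (seq[k] :: seq[k + 1] :: seq[k + 2] :: seq[k + 3] :: seq.drop (k + 4))
            = true := by
          simp [jump4, hcond.1, hcond.2.1, hcond.2.2]
        rw [ht]; simp
      · rw [if_neg hcond,
          show ((k : Int) + 1) = ((k + 1 : Nat) : Int) from by push_cast; ring,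
          ihf (k + 1) (by omega), hdrop1]
        have ht : jump4 (seq[k] :: seq[k + 1] :: seq[k + 2] :: seq[k + 3] :: seq.drop (k + 4))
            = jump4 (seq[k + 1] :: seq[k + 2] :: seq[k + 3] :: seq.drop (k + 4)) := by
          simp only [jump4]
          rcases not_and_or.mp hcond with h' | h'
          · simp [not_not.mp h']
          · rcases not_and_or.mp h' with h'' | h'' <;> simp [not_not.mp h'']
        rw [ht]
    · rw [PySem.List.pyRange_one_eq_nil (by omega),
        jump4_short _ (by rw [List.length_drop]; omega)]
      simp [loopA4]

-- the two per-table steps agree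
lemma stepTable_eq (acc : Int × Int × Int) (seq : List Int) :
    stepTableA acc seq = stepTableB acc seq := by
  simp only [stepTableA, stepTableB]
  obtain ⟨hm, hj⟩ := scan_flags seq
  rw [hm, hj]
  have h3 := loopA3_eq seq seq.length 0 (by omega)
  have h4 := loopA4_eq seq seq.length 0 (by omega)
  rw [Nat.cast_zero, List.drop_zero] at h3 h4
  rw [h3, h4]
  split_ifs <;> simp <;> omega

lemma fold_eq : ∀ (ts : List (List Int)) (acc : Int × Int × Int),
    ts.foldl stepTableA acc = ts.foldl stepTableB acc := by
  intro ts
  induction ts with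
  | nil => intro _; rfl
  | cons s ts ih => intro acc; rw [List.foldl_cons, List.foldl_cons, stepTable_eq, ih]

theorem analyze_tables_spec : Claim_equal_analyze_tables := by
  intro tables _
  unfold Spec_analyze_tables analyze_tables analyze_tables_alt
  exact fold_eq tables (0, 0, 0)
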